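-- pv_equiv track=rewrite | github.com/BrooksLabUCSC/flair | bin/bam2Bed12.py | juncsToBed12
-- ===== SOURCE A (Python) =====
-- def juncsToBed12(start, end, coords):
--     '''
--     junctToBed12 takes in alignment start position, end position, and genomic junction coordinates
--     and converts them to start, end, and length blocks for bed12.
--     '''
--
--     sizes, starts = [],[]
--
--     #coords with 0 length are reads without introns
--     if len(coords) > 0:
--         for num,junc in enumerate(coords,0):
--             # a junc is 2 Splice Sites
--             ss1, ss2 = junc
--
--             # initial start is 0
--             if num == 0:
--                 st = 0
--                 size = abs(start-ss1)
--             else: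
--                 st = coords[num-1][1] - start
--                 size =  ss1 - (st + start)
--             starts.append(st)
--             sizes.append(size)
--
--         # Here is the computation for the BED end coordinate
--         st = coords[-1][1] - start
--         size =  end - (st + start)
--         starts.append(st)
--         sizes.append(size)
--
--
--         return len(starts), sizes, starts
--     else:
--         return 1, [end-start], [0]
-- ===== SOURCE B (Python) =====
-- def juncsToBed12(start, end, coords):
--     # Recursive decomposition: blocks(left, cs) returns the (sizes, starts)
--     # of all exon blocks from boundary `left` onwards, built back-to-front.
--     def blocks(left, cs):
--         if not cs:
--             return [end - left], [left - start]
--         (a, b) = cs[0]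
--         sizes, starts = blocks(b, cs[1:])
--         return [a - left] + sizes, [left - start] + starts
--
--     if not coords:
--         return 1, [end - start], [0]
--     a0, b0 = coords[0]
--     sizes, starts = blocks(b0, coords[1:])
--     sizes = [abs(start - a0)] + sizes
--     starts = [0] + starts
--     return len(starts), sizes, starts
-- ===== Notes on version B (the rewrite author's own statement) =====
-- stated objective: alternative
-- what changed: Replaces A's indexed enumerate loop with coords[num-1] lookbehind and a separate final-block append by a structural recursion on the junction list that builds the sizes/starts lists back-to-front from a single running left boundary, with the first block (abs size, start 0) attached at the top level.
import Mathlib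
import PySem

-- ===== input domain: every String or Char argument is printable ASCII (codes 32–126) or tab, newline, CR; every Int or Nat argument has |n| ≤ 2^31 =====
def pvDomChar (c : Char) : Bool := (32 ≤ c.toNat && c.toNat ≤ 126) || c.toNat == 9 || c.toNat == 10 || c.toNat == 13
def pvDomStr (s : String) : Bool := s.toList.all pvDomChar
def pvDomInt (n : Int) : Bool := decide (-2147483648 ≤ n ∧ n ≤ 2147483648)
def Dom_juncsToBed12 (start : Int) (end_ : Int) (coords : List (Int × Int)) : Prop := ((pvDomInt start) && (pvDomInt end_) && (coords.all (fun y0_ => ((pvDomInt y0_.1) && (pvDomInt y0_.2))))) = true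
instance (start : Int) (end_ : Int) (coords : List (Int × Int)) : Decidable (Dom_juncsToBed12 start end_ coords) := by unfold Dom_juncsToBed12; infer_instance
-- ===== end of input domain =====

-- B replaces A's indexed loop (coords[num-1] lookbehind, then a separate final-block
-- append) by a structural recursion on the junction list building the lists back-to-front.

-- ===== PORT A =====
-- the 'for num,junc in enumerate(coords,0)' loop: recursion over coords carrying num
def pvLoopA (start : Int) (coords : List (Int × Int)) :
    Nat → List Int → List Int → List (Int × Int) → List Int × List Int
  | _, sizes, starts, [] => (sizes, starts)
  | num, sizes, starts, junc :: restJ =>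
    let ss1 := junc.1
    if num = 0 then
      pvLoopA start coords (num + 1) (sizes ++ [|start - ss1|]) (starts ++ [(0 : Int)]) restJ
    else
      let st := ((PySem.List.pyGet? coords ((num : Int) - 1)).getD (0, 0)).2 - start
      pvLoopA start coords (num + 1) (sizes ++ [ss1 - (st + start)]) (starts ++ [st]) restJ

def juncsToBed12 (start : Int) (end_ : Int) (coords : List (Int × Int)) : Int × List Int × List Int :=
  if coords.length > 0 then
    let p := pvLoopA start coords 0 [] [] coords
    let st := ((PySem.List.pyGet? coords (-1)).getD (0, 0)).2 - start
    let size := end_ - (st + start)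
    let starts := p.2 ++ [st]
    let sizes := p.1 ++ [size]
    ((starts.length : Int), sizes, starts)
  else (1, [end_ - start], [0])

-- ===== PORT B =====
-- the inner recursive helper 'blocks(left, cs)' of Source B
def pvBlocksB (start end_ : Int) : Int → List (Int × Int) → List Int × List Int
  | left, [] => ([end_ - left], [left - start])
  | left, (a, b) :: t =>
    let p := pvBlocksB start end_ b t
    ((a - left) :: p.1, (left - start) :: p.2)

def juncsToBed12_alt (start : Int) (end_ : Int) (coords : List (Int × Int)) : Int × List Int × List Int :=
  match coords with
  | [] => (1, [end_ - start], [0])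
  | (a0, b0) :: rest =>
    let p := pvBlocksB start end_ b0 rest
    let sizes := |start - a0| :: p.1
    let starts := (0 : Int) :: p.2
    ((starts.length : Int), sizes, starts)

-- ===== PRECONDITION & SPEC =====
def Spec_juncsToBed12 (start : Int) (end_ : Int) (coords : List (Int × Int)) (out : Int × List Int × List Int) : Prop := out = juncsToBed12_alt start end_ coords
instance (start : Int) (end_ : Int) (coords : List (Int × Int)) (out : Int × List Int × List Int) : Decidable (Spec_juncsToBed12 start end_ coords out) := by unfold Spec_juncsToBed12; infer_instance

-- ===== CLAIM (what is proved, stated in full; the proofs are below) =====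
def Claim_equal_juncsToBed12 : Prop := ∀ (start : Int) (end_ : Int) (coords : List (Int × Int)), Dom_juncsToBed12 start end_ coords → Spec_juncsToBed12 start end_ coords (juncsToBed12 start end_ coords)

-- ===== LEMMAS AND PROOFS =====

-- gaps between consecutive junctions (A's loop body for num ≥ 1)
def pvGaps : Int → List (Int × Int) → List Int
  | _, [] => []
  | prevb, (a, b) :: t => (a - prevb) :: pvGaps b t

-- A's block starts for num ≥ 1
def pvSts (start : Int) : Int → List (Int × Int) → List Int
  | _, [] => []
  | prevb, (_, b) :: t => (prevb - start) :: pvSts start b t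

-- .2 of the last junction, seeded with prevb
def pvLast : Int → List (Int × Int) → Int
  | prevb, [] => prevb
  | _, (_, b) :: t => pvLast b t

theorem pvLoopA_eq (start : Int) (t : List (Int × Int)) :
    ∀ (p : List (Int × Int)) (q : Int × Int) (sizes starts : List Int),
    pvLoopA start ((p ++ [q]) ++ t) (p.length + 1) sizes starts t =
      (sizes ++ pvGaps q.2 t, starts ++ pvSts start q.2 t) := by
  induction t with
  | nil => intro p q sizes starts; simp [pvLoopA, pvGaps, pvSts]
  | cons junc rest ih =>
    intro p q sizes starts
    obtain ⟨a, b⟩ := junc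
    rw [pvLoopA]
    have hidx : ((((p.length + 1 : Nat)) : Int) - 1) = ((p.length : Nat) : Int) := by
      push_cast; ring
    have hget : PySem.List.pyGet? ((p ++ [q]) ++ (a, b) :: rest) (((p.length + 1 : Nat) : Int) - 1)
        = some q := by
      rw [hidx, PySem.List.pyGet?_natCast]
      rw [List.getElem?_append_left (by simp)]
      simp
    simp only [if_neg (Nat.succ_ne_zero p.length), hget]
    have hre : (p ++ [q]) ++ (a, b) :: rest = ((p ++ [q]) ++ [(a, b)]) ++ rest := by simp
    have hn : p.length + 1 + 1 = (p ++ [q]).length + 1 := by simp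
    rw [hre, hn, ih (p ++ [q]) (a, b)]
    simp [pvGaps, pvSts, List.append_assoc]

-- B's recursion splits into A's loop gaps plus the closing block
theorem pvBlocksB_eq (start end_ : Int) (t : List (Int × Int)) :
    ∀ prevb, pvBlocksB start end_ prevb t
      = (pvGaps prevb t ++ [end_ - pvLast prevb t],
         pvSts start prevb t ++ [pvLast prevb t - start]) := by
  induction t with
  | nil => intro prevb; simp [pvBlocksB, pvGaps, pvSts, pvLast]
  | cons junc rest ih =>
    intro prevb; obtain ⟨a, b⟩ := junc
    simp [pvBlocksB, pvGaps, pvSts, pvLast, ih b]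

theorem pvSts_length (start : Int) (t : List (Int × Int)) :
    ∀ prevb, (pvSts start prevb t).length = t.length := by
  induction t with
  | nil => intro prevb; simp [pvSts]
  | cons junc rest ih =>
    intro prevb; obtain ⟨a, b⟩ := junc
    simp [pvSts, ih b]

theorem getLast?_snd (t : List (Int × Int)) :
    ∀ (a b : Int), (((a, b) :: t).getLast?.getD (0, 0)).2 = pvLast b t := by
  induction t with
  | nil => intro a b; simp [pvLast]
  | cons junc rest ih =>
    intro a b; obtain ⟨x, y⟩ := junc
    rw [List.getLast?_cons_cons]
    simpa [pvLast] using ih x y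

-- ===== VERDICT (by name: the statement is the Claim_ definition above) =====
theorem juncsToBed12_spec : Claim_equal_juncsToBed12 := by
  intro start end_ coords _dom
  unfold Spec_juncsToBed12
  cases coords with
  | nil => simp [juncsToBed12, juncsToBed12_alt]
  | cons junc t =>
    obtain ⟨a, b⟩ := junc
    have hA : pvLoopA start ((a, b) :: t) 0 [] [] ((a, b) :: t)
        = ([|start - a|] ++ pvGaps b t, [(0 : Int)] ++ pvSts start b t) := by
      rw [pvLoopA]
      have := pvLoopA_eq start t [] (a, b) [|start - a|] [(0 : Int)]
      simpa using this
    have hlast : ((PySem.List.pyGet? ((a, b) :: t) (-1)).getD (0, 0)).2 = pvLast b t := by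
      rw [PySem.List.pyGet?_neg_one]
      exact getLast?_snd t a b
    simp only [juncsToBed12, juncsToBed12_alt, List.length_cons, if_pos (Nat.succ_pos t.length),
      hA, hlast, pvBlocksB_eq]
    refine Prod.ext ?_ (Prod.ext ?_ ?_)
    · simp [pvSts_length]
    · simp
    · simp
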